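-- pv_equiv track=rewrite | github.com/jerry81/Project-Euler-Solutions | src/euler51.py | hasDupe
-- ===== SOURCE A (Python) =====
-- def hasDupe(input):
--     asStr = str(input)
--     hasDupe = False
--     countMap = {}
--     for i in range(0, len(asStr)):
--         countMap[asStr[i]] = 0
--     for i in range(0, len(asStr)):
--         countMap[asStr[i]] += 1
--         if countMap[asStr[i]] > 1:
--             hasDupe = True
--     return hasDupe
-- ===== SOURCE B (Python) =====
-- def hasDupe(input):
--     s = sorted(str(input))
--     return any(a == b for a, b in zip(s, s[1:]))
-- ===== Notes on version B (the rewrite author's own statement) =====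
-- stated objective: alternative
-- what changed: Replaces A's two index loops and per-character count dictionary with a sort-then-scan: sort the characters of str(input) and report whether any adjacent pair is equal.
import Mathlib
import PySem

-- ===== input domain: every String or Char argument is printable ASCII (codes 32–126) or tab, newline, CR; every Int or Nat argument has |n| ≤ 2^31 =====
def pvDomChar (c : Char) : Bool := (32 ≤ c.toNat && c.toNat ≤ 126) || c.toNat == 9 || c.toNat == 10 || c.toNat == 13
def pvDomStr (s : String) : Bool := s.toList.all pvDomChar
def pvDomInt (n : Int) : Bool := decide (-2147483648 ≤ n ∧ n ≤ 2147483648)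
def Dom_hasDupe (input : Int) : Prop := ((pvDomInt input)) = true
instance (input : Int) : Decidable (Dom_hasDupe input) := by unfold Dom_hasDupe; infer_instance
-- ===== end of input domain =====

-- B replaces A's two index loops and count dictionary with a different algorithm:
-- sort the characters and scan for an adjacent equal pair (alternative; O(n log n)).

-- ===== PORT A =====
def hasDupe (input : Int) : Bool :=
  let asStr := PySem.Int.toChars input
  let countMap : PySem.Dict Char Int :=
    (PySem.List.pyRange 0 (PySem.List.len asStr)).foldl
      (fun d i => d.insert (PySem.List.pyGetD asStr i ' ') 0) PySem.Dict.empty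
  let st :=
    (PySem.List.pyRange 0 (PySem.List.len asStr)).foldl
      (fun (s : PySem.Dict Char Int × Bool) i =>
        let c := PySem.List.pyGetD asStr i ' '
        let d := s.1.modify c 0 (· + 1)
        (d, if d.getD c 0 > 1 then true else s.2))
      (countMap, false)
  st.2

-- ===== PORT B =====
-- s = sorted(str(input)); any(a == b for a, b in zip(s, s[1:]))
def hasDupe_alt (input : Int) : Bool :=
  let s := PySem.List.sorted (PySem.Int.toChars input) (fun c => c) false
  (s.zip (PySem.List.slice s (some 1) none)).any (fun p => p.1 == p.2)

-- ===== PRECONDITION & SPEC =====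
def Spec_hasDupe (input : Int) (out : Bool) : Prop := out = hasDupe_alt input
instance (input : Int) (out : Bool) : Decidable (Spec_hasDupe input out) := by unfold Spec_hasDupe; infer_instance

-- ===== CLAIM (what is proved, stated in full; the proofs are below) =====
def Claim_equal_hasDupe : Prop := ∀ (input : Int), Dom_hasDupe input → Spec_hasDupe input (hasDupe input)

-- ===== LEMMAS AND PROOFS =====

-- A's first loop only installs zeros: every key of the resulting dict reads 0.
theorem pv_zeroMap_getD (cs : List Char) (d : PySem.Dict Char Int)
    (h : ∀ c, d.getD c 0 = 0) : ∀ c, (cs.foldl (fun d c => d.insert c 0) d).getD c 0 = 0 := by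
  induction cs generalizing d with
  | nil => exact h
  | cons x t ih =>
      refine ih _ (fun c => ?_)
      rw [PySem.Dict.getD_insert]
      split_ifs with hc
      · rfl
      · exact h c

-- One step of A's counting loop on the dict component.
theorem pv_modify_getD (d : PySem.Dict Char Int) (c x : Char) :
    (d.modify c 0 (· + 1)).getD x 0 = if x = c then d.getD c 0 + 1 else d.getD x 0 := by
  split_ifs with hx
  · subst hx; exact PySem.Dict.getD_modify_self d x 0 _
  · exact PySem.Dict.getD_modify_of_ne d 0 _ hx

-- A's counting loop: the flag ends true iff it started true, some char of cs was
-- already counted in the processed prefix pre, or cs itself has a repeat.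
theorem pv_loop (cs : List Char) (pre : List Char) (d : PySem.Dict Char Int) (b : Bool)
    (h : ∀ c, d.getD c 0 = (pre.count c : Int)) :
    (cs.foldl
        (fun (s : PySem.Dict Char Int × Bool) c =>
          let d := s.1.modify c 0 (· + 1)
          (d, if d.getD c 0 > 1 then true else s.2))
        (d, b)).2
      = (b || decide (∃ c ∈ cs, 1 ≤ pre.count c) || !decide cs.Nodup) := by
  induction cs generalizing pre d b with
  | nil => simp
  | cons x t ih =>
      simp only [List.foldl_cons]
      rw [ih (pre ++ [x]) (d.modify x 0 (· + 1)) _ (fun c => by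
        rw [pv_modify_getD, List.count_append]
        by_cases hc : c = x
        · subst hc; simp [h c]
        · have hx : ¬ x = c := fun h' => hc h'.symm
          simp [hc, hx, h c])]
      have hflag : (if (d.modify x 0 (· + 1)).getD x 0 > 1 then true else b)
          = (b || decide (1 ≤ pre.count x)) := by
        rw [PySem.Dict.getD_modify_self, h x]
        by_cases hx : 1 ≤ pre.count x
        · have : ((pre.count x : Int) + 1 > 1) := by omega
          simp [hx, this]
        · have : ¬ ((pre.count x : Int) + 1 > 1) := by omega
          simp [hx, this]
      rw [hflag]
      apply Bool.eq_iff_iff.mpr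
      simp only [Bool.or_eq_true, Bool.not_eq_true', decide_eq_true_eq, decide_eq_false_iff_not,
        List.count_append, List.count_singleton, List.mem_cons, List.nodup_cons, not_and_or,
        not_not]
      constructor
      · rintro (((hb | hx) | ⟨c, hc, hcnt⟩) | ht)
        · exact Or.inl (Or.inl hb)
        · exact Or.inl (Or.inr ⟨x, Or.inl rfl, hx⟩)
        · by_cases hcx : c = x
          · subst hcx
            by_cases h1 : 1 ≤ pre.count c
            · exact Or.inl (Or.inr ⟨c, Or.inr hc, h1⟩)
            · exact Or.inr (Or.inl hc)
          · refine Or.inl (Or.inr ⟨c, Or.inr hc, ?_⟩)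
            have hx : ¬ x = c := fun h' => hcx h'.symm
            simpa [hx] using hcnt
        · exact Or.inr (Or.inr ht)
      · rintro ((hb | ⟨c, (rfl | hc), hcnt⟩) | (hx | ht))
        · exact Or.inl (Or.inl (Or.inl hb))
        · exact Or.inl (Or.inl (Or.inr hcnt))
        · refine Or.inl (Or.inr ⟨c, hc, le_trans hcnt ?_⟩)
          split_ifs with hcx <;> omega
        · exact Or.inl (Or.inr ⟨x, hx, by simp⟩)
        · exact Or.inr ht

-- B's scan: zip(s, s[1:]) has an equal pair iff s is NOT an adjacent-distinct chain.
theorem pv_adj (l : List Char) :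
    ((l.zip l.tail).any (fun p => p.1 == p.2)) = true ↔ ¬ l.IsChain (fun a b => ¬ a = b) := by
  induction l with
  | nil => simp
  | cons x t ih =>
      cases t with
      | nil => simp
      | cons y u =>
          simp only [List.tail_cons, List.zip_cons_cons, List.any_cons, List.isChain_cons_cons,
            Bool.or_eq_true, beq_iff_eq, not_and_or, not_not]
  -- after simp both sides are 'x = y ∨ ¬ IsChain … (y::u)' up to the ih rewrite
          tauto

-- Two adjacent chains combine pointwise.
theorem pv_chain_and {α : Type} {r s : α → α → Prop} (l : List α)
    (hr : l.IsChain r) (hs : l.IsChain s) : l.IsChain (fun a b => r a b ∧ s a b) := by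
  induction l with
  | nil => exact List.IsChain.nil
  | cons x t ih =>
      cases t with
      | nil => exact List.IsChain.singleton x
      | cons y u =>
          rw [List.isChain_cons_cons] at *
          exact ⟨⟨hr.1, hs.1⟩, ih hr.2 hs.2⟩

-- On a ≤-sorted list, adjacent-distinct is exactly Nodup.
theorem pv_sorted_chain_nodup (l : List Char) (hle : l.Pairwise (· ≤ ·)) :
    l.IsChain (fun a b => ¬ a = b) ↔ l.Nodup := by
  constructor
  · intro hne
    have hlt : l.IsChain (· < ·) :=
      (pv_chain_and l hle.isChain hne).imp (fun {a b} h => lt_of_le_of_ne h.1 h.2)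
    exact hlt.pairwise.imp ne_of_lt
  · intro hnd
    exact hnd.isChain

-- ===== VERDICT (by name: the statement is the Claim_ definition above) =====
theorem hasDupe_spec : Claim_equal_hasDupe := by
  intro input _
  unfold Spec_hasDupe hasDupe hasDupe_alt
  dsimp only
  set cs := PySem.Int.toChars input with hcs
  rw [show (fun (d : PySem.Dict Char Int) (i : Int) => d.insert (PySem.List.pyGetD cs i ' ') 0)
        = (fun d i => (fun (d : PySem.Dict Char Int) (c : Char) => d.insert c 0) d (PySem.List.pyGetD cs i ' ')) from rfl,
      PySem.List.foldl_pyRange_pyGetD (xs := cs) (d := ' ')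
        (f := fun (d : PySem.Dict Char Int) (c : Char) => d.insert c 0)
        (init := PySem.Dict.empty) (le_refl 0),
      show (fun (s : PySem.Dict Char Int × Bool) (i : Int) =>
              (s.1.modify (PySem.List.pyGetD cs i ' ') 0 (· + 1),
                if (s.1.modify (PySem.List.pyGetD cs i ' ') 0 (· + 1)).getD (PySem.List.pyGetD cs i ' ') 0 > 1 then true else s.2))
        = (fun s i => (fun (s : PySem.Dict Char Int × Bool) (c : Char) =>
              (s.1.modify c 0 (· + 1),
                if (s.1.modify c 0 (· + 1)).getD c 0 > 1 then true else s.2)) s (PySem.List.pyGetD cs i ' ')) from rfl,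
      PySem.List.foldl_pyRange_pyGetD (xs := cs) (d := ' ')
        (f := fun (s : PySem.Dict Char Int × Bool) (c : Char) =>
              (s.1.modify c 0 (· + 1),
                if (s.1.modify c 0 (· + 1)).getD c 0 > 1 then true else s.2))
        (init := (List.foldl (fun (d : PySem.Dict Char Int) (c : Char) => d.insert c 0) PySem.Dict.empty (List.drop (0:Int).toNat cs), false))
        (le_refl 0)]
  simp only [Int.toNat_zero, List.drop_zero]
  rw [pv_loop cs [] _ false (fun c => by
    simpa using pv_zeroMap_getD cs PySem.Dict.empty (fun c => PySem.Dict.getD_empty c 0) c)]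
  set s := PySem.List.sorted cs (fun c => c) false with hs
  rw [PySem.List.slice_from_one]
  have hperm : s.Perm cs := PySem.List.sorted_perm cs (fun c => c) false
  have hpw : s.Pairwise (· ≤ ·) := PySem.List.sorted_pairwise cs (fun c => c)
  have hiff : s.IsChain (fun a b => ¬ a = b) ↔ cs.Nodup := by
    rw [pv_sorted_chain_nodup s hpw]
    exact hperm.nodup_iff
  simp only [List.count_nil]
  apply Bool.eq_iff_iff.mpr
  rw [pv_adj s, hiff]
  simp
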